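-- pv_equiv track=rewrite | github.com/arindhimar/BluePineapple | Python Programs/17-12-25/030.py | substrings_same_start_end
-- ===== SOURCE A (Python) =====
-- def substrings_same_start_end(word):
--     substrs=[]
--     n=len(word)
--
--     for i in range(n):
--         for j in range(i+1, n+1):
--             substr=word[i:j]
--             if substr[0]==substr[-1]:
--                 substrs.append(substr)
--
--     return substrs
-- ===== SOURCE B (Python) =====
-- def substrings_same_start_end(word):
--     positions = {}
--     for idx, ch in enumerate(word):
--         positions.setdefault(ch, []).append(idx)
--     substrs = []
--     for i, ch in enumerate(word):
--         for e in positions[ch]: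
--             if e >= i:
--                 substrs.append(word[i:e + 1])
--     return substrs
-- ===== Notes on version B (the rewrite author's own statement) =====
-- stated objective: alternative
-- what changed: B builds a dict mapping each character to its ascending occurrence indices in one pass, then for each start index walks only the matching end positions (e >= i), instead of A's testing the first and last character of every (i, j) substring.
import Mathlib
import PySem

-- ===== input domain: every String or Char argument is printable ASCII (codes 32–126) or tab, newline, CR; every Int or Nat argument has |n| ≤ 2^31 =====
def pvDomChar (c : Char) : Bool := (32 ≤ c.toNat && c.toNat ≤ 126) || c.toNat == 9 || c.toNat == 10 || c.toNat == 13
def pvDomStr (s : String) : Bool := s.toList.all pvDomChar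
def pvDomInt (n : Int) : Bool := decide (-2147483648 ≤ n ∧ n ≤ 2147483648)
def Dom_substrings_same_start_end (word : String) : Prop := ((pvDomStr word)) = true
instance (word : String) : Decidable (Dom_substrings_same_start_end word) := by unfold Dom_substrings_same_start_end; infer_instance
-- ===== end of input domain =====

-- B replaces A's test of every (i, j) substring with a one-pass dict from each character to its
-- ascending occurrence indices, walking only matching end positions per start; equal return values proved.

-- ===== PORT A =====
def substrings_same_start_end (word : String) : List String :=
  let n : Int := PySem.Str.len word
  (PySem.List.pyRange 0 n 1).foldl (fun substrs i =>
    (PySem.List.pyRange (i + 1) (n + 1) 1).foldl (fun substrs j =>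
      let substr := PySem.Str.slice word (some i) (some j)
      if PySem.Str.pyGet? substr 0 == PySem.Str.pyGet? substr (-1) then substrs ++ [substr]
      else substrs) substrs) []

-- ===== PORT B =====
def substrings_same_start_end_alt (word : String) : List String :=
  let positions : PySem.Dict Char (List Int) :=
    (PySem.List.enumerate word.toList 0).foldl
      (fun d p => d.modify p.2 [] (fun l => l ++ [p.1])) PySem.Dict.empty
  (PySem.List.enumerate word.toList 0).foldl (fun substrs p =>
    (positions.getD p.2 []).foldl (fun substrs e =>
      if e ≥ p.1 then substrs ++ [PySem.Str.slice word (some p.1) (some (e + 1))]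
      else substrs) substrs) []

-- ===== PRECONDITION & SPEC =====
def Spec_substrings_same_start_end (word : String) (out : List String) : Prop := out = substrings_same_start_end_alt word
instance (word : String) (out : List String) : Decidable (Spec_substrings_same_start_end word out) := by unfold Spec_substrings_same_start_end; infer_instance

-- ===== CLAIM (what is proved, stated in full; the proofs are below) =====
def Claim_equal_substrings_same_start_end : Prop := ∀ (word : String), Dom_substrings_same_start_end word → Spec_substrings_same_start_end word (substrings_same_start_end word)

-- ===== LEMMAS AND PROOFS =====

-- the shared normal form: for each start i, the ends e = i + k carrying the same character, in order
def innerCanon (word : String) (i : Nat) : List String :=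
  ((List.range (word.toList.length - i)).filter
      (fun k : Nat => word.toList.getD (i + k) 'x' == word.toList.getD i 'x')).map
    (fun k : Nat => PySem.Str.slice word (some (i : Int)) (some ((i : Int) + (k : Int) + 1)))

def canon (word : String) : List String :=
  (List.range word.toList.length).flatMap (fun i => innerCanon word i)

-- Prop-conditioned variant of PySem.List.foldl_append_if (port B's if is a Prop ite on `e >= i`)
lemma foldl_append_ite {α β : Type} (p : α → Prop) [DecidablePred p] (f : α → β)
    (l : List α) (acc : List β) :
    l.foldl (fun acc x => if p x then acc ++ [f x] else acc) acc
      = acc ++ (l.filter (fun x => decide (p x))).map f := by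
  rw [← PySem.List.foldl_append_if (fun x => decide (p x)) f l acc]
  simp

lemma enum_eq {α : Type} (d : α) (L : List α) (s : Int) :
    PySem.List.enumerate L s
      = (List.range L.length).map (fun k : Nat => ((s + (k : Int), L.getD k d) : Int × α)) := by
  induction L generalizing s with
  | nil => simp [PySem.List.enumerate_nil]
  | cons x xs ih =>
    rw [PySem.List.enumerate_cons, ih]
    simp only [List.length_cons, List.range_succ_eq_map, List.map_cons, List.map_map]
    congr 1
    · simp
    · apply List.map_congr_left
      intro k hk
      simp only [Function.comp_apply, Nat.succ_eq_add_one, List.getD_cons_succ, Prod.mk.injEq]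
      exact ⟨by push_cast; ring, trivial⟩

lemma enum_eq_zero {α : Type} (d : α) (L : List α) :
    PySem.List.enumerate L 0
      = (List.range L.length).map (fun k : Nat => (((k : Int), L.getD k d) : Int × α)) := by
  rw [enum_eq d L 0]
  apply List.map_congr_left
  intro k hk
  simp

lemma build_pos (L : List Char) : ∀ (s : Int) (d : PySem.Dict Char (List Int)) (c : Char),
    ((PySem.List.enumerate L s).foldl (fun d p => d.modify p.2 [] (fun l => l ++ [p.1])) d).getD c []
      = d.getD c [] ++ ((PySem.List.enumerate L s).filter (fun p => p.2 == c)).map (·.1) := by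
  induction L with
  | nil => intro s d c; simp [PySem.List.enumerate_nil]
  | cons x xs ih =>
    intro s d c
    rw [PySem.List.enumerate_cons]
    simp only [List.foldl_cons, List.filter_cons]
    rw [ih]
    by_cases h : x = c
    · subst h
      rw [PySem.Dict.getD_modify_self]
      simp [List.append_assoc]
    · rw [PySem.Dict.getD_modify_of_ne _ _ _ (fun hc : c = x => h hc.symm)]
      simp [h]

lemma slice_toList (word : String) (i k : Nat) :
    (PySem.Str.slice word (some (i : Int)) (some ((i : Int) + 1 + (k : Int)))).toList
      = (word.toList.drop i).take (k + 1) := by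
  rw [show (i : Int) + 1 + (k : Int) = ((i + (k + 1) : Nat) : Int) from by push_cast; ring]
  rw [PySem.Str.toList_slice, PySem.Chars.slice_eq_listSlice, PySem.List.slice_natCast]
  rw [show i + (k + 1) - i = k + 1 from by omega]

lemma first_char (word : String) (i k : Nat) :
    PySem.Str.pyGet? (PySem.Str.slice word (some (i : Int)) (some ((i : Int) + 1 + (k : Int)))) 0
      = word.toList[i]? := by
  rw [show (0 : Int) = ((0 : Nat) : Int) from rfl, PySem.Str.pyGet?_natCast, slice_toList]
  simp [List.getElem?_drop]

lemma last_char (word : String) (i k : Nat) (hik : i + k < word.toList.length) :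
    PySem.Str.pyGet? (PySem.Str.slice word (some (i : Int)) (some ((i : Int) + 1 + (k : Int)))) (-1)
      = word.toList[i + k]? := by
  rw [PySem.Str.pyGet?_eq, PySem.Chars.pyGet?_eq_listPyGet?, slice_toList,
    PySem.List.pyGet?_neg_one, List.getLast?_eq_getElem?]
  have hlen : ((word.toList.drop i).take (k + 1)).length = k + 1 := by
    rw [List.length_take, List.length_drop]
    omega
  rw [hlen]
  simp [List.getElem?_drop]

lemma condA_eq (word : String) (i k : Nat) (hi : i < word.toList.length)
    (hik : i + k < word.toList.length) :
    (PySem.Str.pyGet? (PySem.Str.slice word (some (i : Int)) (some ((i : Int) + 1 + (k : Int)))) 0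
      == PySem.Str.pyGet? (PySem.Str.slice word (some (i : Int)) (some ((i : Int) + 1 + (k : Int)))) (-1))
    = (word.toList.getD (i + k) 'x' == word.toList.getD i 'x') := by
  rw [first_char, last_char word i k hik]
  rw [List.getD_eq_getElem _ _ hik, List.getD_eq_getElem _ _ hi]
  rw [List.getElem?_eq_getElem hi, List.getElem?_eq_getElem hik]
  rw [Bool.eq_iff_iff]
  simp only [beq_iff_eq, Option.some.injEq]
  exact eq_comm

lemma A_eq (word : String) : substrings_same_start_end word = canon word := by
  simp only [substrings_same_start_end]
  rw [PySem.Str.len_eq, PySem.List.pyRange_zero_nat, List.foldl_map]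
  refine (PySem.List.foldl_congr_mem _ _ (fun acc i => acc ++ innerCanon word i) _ ?_).trans ?_
  · intro acc i hi
    rw [List.mem_range] at hi
    simp only []
    rw [PySem.List.pyRange_one,
      show (((word.toList.length : Int) + 1) - ((i : Int) + 1)).toNat = word.toList.length - i
        from by omega,
      List.foldl_map]
    rw [PySem.List.foldl_append_if
      (fun k : Nat => (PySem.Str.pyGet? (PySem.Str.slice word (some (i : Int)) (some ((i : Int) + 1 + (k : Int)))) 0
        == PySem.Str.pyGet? (PySem.Str.slice word (some (i : Int)) (some ((i : Int) + 1 + (k : Int)))) (-1)))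
      (fun k : Nat => PySem.Str.slice word (some (i : Int)) (some ((i : Int) + 1 + (k : Int))))]
    have hfA : List.filter
        (fun k : Nat => (PySem.Str.pyGet? (PySem.Str.slice word (some (i : Int)) (some ((i : Int) + 1 + (k : Int)))) 0
          == PySem.Str.pyGet? (PySem.Str.slice word (some (i : Int)) (some ((i : Int) + 1 + (k : Int)))) (-1)))
        (List.range (word.toList.length - i))
        = List.filter (fun k : Nat => word.toList.getD (i + k) 'x' == word.toList.getD i 'x')
            (List.range (word.toList.length - i)) :=
      List.filter_congr (fun k hk => condA_eq word i k hi
        (by rw [List.mem_range] at hk; omega))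
    have hfm : (fun k : Nat => PySem.Str.slice word (some (i : Int)) (some ((i : Int) + 1 + (k : Int))))
        = (fun k : Nat => PySem.Str.slice word (some (i : Int)) (some ((i : Int) + (k : Int) + 1))) := by
      funext k
      rw [show (i : Int) + 1 + (k : Int) = (i : Int) + (k : Int) + 1 from by ring]
    rw [hfA, hfm]
    rfl
  · rw [PySem.List.foldl_append_eq_flatMap]
    simp [canon]

lemma B_eq (word : String) : substrings_same_start_end_alt word = canon word := by
  simp only [substrings_same_start_end_alt]
  have hpos : ∀ c : Char,
      ((PySem.List.enumerate word.toList 0).foldl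
          (fun d p => d.modify p.2 [] (fun l => l ++ [p.1])) PySem.Dict.empty).getD c []
        = ((List.range word.toList.length).filter (fun e : Nat => word.toList.getD e 'x' == c)).map
            (fun e : Nat => (e : Int)) := by
    intro c
    rw [build_pos, enum_eq_zero 'x' word.toList, List.filter_map, List.map_map]
    rfl
  simp only [hpos]
  rw [enum_eq_zero 'x' word.toList, List.foldl_map]
  refine (PySem.List.foldl_congr_mem _ _ (fun acc i => acc ++ innerCanon word i) _ ?_).trans ?_
  · intro acc i hi
    rw [List.mem_range] at hi
    simp only []
    rw [List.foldl_map]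
    rw [foldl_append_ite (fun e : Nat => ((e : Int) ≥ (i : Int)))
      (fun e : Nat => PySem.Str.slice word (some (i : Int)) (some ((e : Int) + 1)))]
    rw [List.filter_filter]
    congr 1
    unfold innerCanon
    have hsplit : List.range word.toList.length
        = List.range i ++ (List.range (word.toList.length - i)).map (fun k => i + k) := by
      conv_lhs => rw [show word.toList.length = i + (word.toList.length - i) from by omega]
      exact List.range_add
    rw [hsplit, List.filter_append, List.map_append]
    have h1 : (List.range i).filter
        (fun e : Nat => decide ((e : Int) ≥ (i : Int)) && (word.toList.getD e 'x' == word.toList.getD i 'x'))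
        = [] := by
      apply List.filter_eq_nil_iff.mpr
      intro e he
      rw [List.mem_range] at he
      simp only [Bool.and_eq_true, decide_eq_true_eq, ge_iff_le, not_and]
      intro hle
      exfalso
      have h2 : (i : Int) ≤ (e : Int) := hle
      omega
    rw [h1, List.map_nil, List.nil_append, List.filter_map, List.map_map]
    have hfB : List.filter
        ((fun e : Nat => decide ((e : Int) ≥ (i : Int)) && (word.toList.getD e 'x' == word.toList.getD i 'x'))
          ∘ (fun k : Nat => i + k))
        (List.range (word.toList.length - i))
        = List.filter (fun k : Nat => word.toList.getD (i + k) 'x' == word.toList.getD i 'x')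
            (List.range (word.toList.length - i)) := by
      apply List.filter_congr
      intro k hk
      simp only [Function.comp_apply]
      simp
    have hgB : ((fun e : Nat => PySem.Str.slice word (some (i : Int)) (some ((e : Int) + 1)))
          ∘ (fun k : Nat => i + k))
        = (fun k : Nat => PySem.Str.slice word (some (i : Int)) (some ((i : Int) + (k : Int) + 1))) := by
      funext k
      simp only [Function.comp_apply]
      rw [show (((i + k : Nat) : Int)) = (i : Int) + (k : Int) from by push_cast; ring]
    rw [hfB, hgB]
  · rw [PySem.List.foldl_append_eq_flatMap]
    simp [canon]

-- ===== VERDICT (by name: the statement is the Claim_ definition above) =====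
theorem substrings_same_start_end_spec : Claim_equal_substrings_same_start_end := by
  intro word _
  unfold Spec_substrings_same_start_end
  rw [A_eq, B_eq]
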